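-- pv_equiv track=rewrite | github.com/forteek/timkod | main.py | count_group_following_elements
-- ===== SOURCE A (Python) =====
-- def count_group_following_elements(content, group_size):
--     groups = {}
--
--     for i in range(0, len(content) - group_size):
--         group = tuple(content[i:i + group_size])
--         following_element = content[i + group_size]
--
--         if group in groups:
--             following_elements = groups[group]
--
--             if following_element in following_elements:
--                 following_elements[following_element] += 1
--             else:
--                 following_elements[following_element] = 1
--         else:
--             groups[group] = {following_element: 1}
--
--     return groups
-- ===== SOURCE B (Python) =====
-- def count_group_following_elements(content, group_size):
--     # Pass 1: flat tally keyed by (window, follower).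
--     flat = {}
--     for i in range(0, len(content) - group_size):
--         key = (tuple(content[i:i + group_size]), content[i + group_size])
--         flat[key] = flat.get(key, 0) + 1
--     # Pass 2: regroup the flat tally into the nested dict.
--     result = {}
--     for (group, follower), count in flat.items():
--         if group in result:
--             result[group][follower] = count
--         else:
--             result[group] = {follower: count}
--     return result
-- ===== Notes on version B (the rewrite author's own statement) =====
-- stated objective: alternative
-- what changed: B replaces A's incremental nested-dict update with a two-phase decomposition: one pass builds a flat tally keyed by (window, follower) pairs, and a second pass over the flat tally regroups it into the nested dict.
import Mathlib
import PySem

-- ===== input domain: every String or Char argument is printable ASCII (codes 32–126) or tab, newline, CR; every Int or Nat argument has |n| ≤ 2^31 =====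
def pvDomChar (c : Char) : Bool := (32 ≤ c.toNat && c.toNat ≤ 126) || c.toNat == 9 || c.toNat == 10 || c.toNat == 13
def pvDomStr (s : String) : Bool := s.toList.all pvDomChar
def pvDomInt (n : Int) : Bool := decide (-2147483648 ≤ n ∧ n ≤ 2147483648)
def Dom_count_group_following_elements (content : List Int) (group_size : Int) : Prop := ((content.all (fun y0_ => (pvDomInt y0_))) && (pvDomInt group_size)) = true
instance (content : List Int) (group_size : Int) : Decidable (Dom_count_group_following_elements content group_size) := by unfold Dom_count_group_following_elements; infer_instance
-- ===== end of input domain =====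

-- B replaces A's incremental nested-dict update with a two-phase decomposition (flat tally keyed by
-- (window, follower), then a regrouping pass); same return value, no speed claim.

-- ===== PORT A =====
def count_group_following_elements (content : List Int) (group_size : Int) : List (List Int × List (Int × Int)) :=
  let groups : PySem.Dict (List Int) (PySem.Dict Int Int) :=
    (PySem.List.pyRange 0 (PySem.List.len content - group_size) 1).foldl
      (fun groups i =>
        let group := PySem.List.slice content (some i) (some (i + group_size))
        let following_element := PySem.List.pyGetD content (i + group_size) 0
        match groups.get? group with
        | some following_elements =>
          match following_elements.get? following_element with
          | some c => groups.insert group (following_elements.insert following_element (c + 1))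
          | none   => groups.insert group (following_elements.insert following_element 1)
        | none => groups.insert group (PySem.Dict.empty.insert following_element 1))
      PySem.Dict.empty
  groups.items.map (fun p => (p.1, p.2.items))

-- ===== PORT B =====
def count_group_following_elements_alt (content : List Int) (group_size : Int) : List (List Int × List (Int × Int)) :=
  -- Pass 1: flat tally keyed by (window, follower)
  let flat : PySem.Dict (List Int × Int) Int :=
    (PySem.List.pyRange 0 (PySem.List.len content - group_size) 1).foldl
      (fun flat i =>
        let key := (PySem.List.slice content (some i) (some (i + group_size)),
                    PySem.List.pyGetD content (i + group_size) 0)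
        flat.insert key (flat.getD key 0 + 1))
      PySem.Dict.empty
  -- Pass 2: regroup the flat tally into the nested dict
  let result : PySem.Dict (List Int) (PySem.Dict Int Int) :=
    flat.items.foldl
      (fun result kv =>
        match result.get? kv.1.1 with
        | some inner => result.insert kv.1.1 (inner.insert kv.1.2 kv.2)
        | none       => result.insert kv.1.1 (PySem.Dict.empty.insert kv.1.2 kv.2))
      PySem.Dict.empty
  result.items.map (fun p => (p.1, p.2.items))

-- ===== PRECONDITION & SPEC =====
-- Pre_ excludes exactly the inputs where Python A raises IndexError: when group_size < -len(content),
-- content[i + group_size] is out of range for i = 0 (B's Python raises there too).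
def Pre_count_group_following_elements (content : List Int) (group_size : Int) : Prop :=
  -(PySem.List.len content) ≤ group_size
instance (content : List Int) (group_size : Int) : Decidable (Pre_count_group_following_elements content group_size) := by unfold Pre_count_group_following_elements; infer_instance

def pvWitness_count_group_following_elements : List Int × Int := ([0, 1, 0, 1, 0], 2)

def Spec_count_group_following_elements (content : List Int) (group_size : Int) (out : List (List Int × List (Int × Int))) : Prop := out = count_group_following_elements_alt content group_size
instance (content : List Int) (group_size : Int) (out : List (List Int × List (Int × Int))) : Decidable (Spec_count_group_following_elements content group_size out) := by unfold Spec_count_group_following_elements; infer_instance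

-- ===== CLAIM (what is proved, stated in full; the proofs are below) =====
def Claim_equal_count_group_following_elements : Prop := ∀ (content : List Int) (group_size : Int), Dom_count_group_following_elements content group_size → Pre_count_group_following_elements content group_size → Spec_count_group_following_elements content group_size (count_group_following_elements content group_size)

-- ===== LEMMAS AND PROOFS =====

-- A's loop body, as a step on (window, follower) pairs.
def pvStepN (d : PySem.Dict (List Int) (PySem.Dict Int Int)) (p : List Int × Int) :
    PySem.Dict (List Int) (PySem.Dict Int Int) :=
  match d.get? p.1 with
  | some inner =>
    match inner.get? p.2 with
    | some c => d.insert p.1 (inner.insert p.2 (c + 1))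
    | none   => d.insert p.1 (inner.insert p.2 1)
  | none => d.insert p.1 (PySem.Dict.empty.insert p.2 1)

-- B's regrouping body, as a step on ((window, follower), count) triples.
def pvStepR (d : PySem.Dict (List Int) (PySem.Dict Int Int)) (q : (List Int × Int) × Int) :
    PySem.Dict (List Int) (PySem.Dict Int Int) :=
  match d.get? q.1.1 with
  | some inner => d.insert q.1.1 (inner.insert q.1.2 q.2)
  | none       => d.insert q.1.1 (PySem.Dict.empty.insert q.1.2 q.2)

-- the inner update A performs for one pair
def pvFN (inn : PySem.Dict Int Int) (p : List Int × Int) : PySem.Dict Int Int :=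
  inn.insert p.2 (inn.getD p.2 0 + 1)

-- the inner update B performs for one flat item
def pvFR (inn : PySem.Dict Int Int) (q : (List Int × Int) × Int) : PySem.Dict Int Int :=
  inn.insert q.1.2 q.2

theorem pvStepN_eq (d : PySem.Dict (List Int) (PySem.Dict Int Int)) (p : List Int × Int) :
    pvStepN d p = d.insert p.1 ((d.getD p.1 PySem.Dict.empty).insert p.2
      ((d.getD p.1 PySem.Dict.empty).getD p.2 0 + 1)) := by
  unfold pvStepN
  rcases h : d.get? p.1 with _ | inner
  · rw [PySem.Dict.getD_of_get?_eq_none _ _ h]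
    simp [PySem.Dict.getD_empty]
  · rw [PySem.Dict.getD_of_get?_eq_some _ _ h]
    rcases h2 : inner.get? p.2 with _ | c
    · rw [PySem.Dict.getD_of_get?_eq_none _ _ h2]
      simp only [h2]
      norm_num
    · rw [PySem.Dict.getD_of_get?_eq_some _ _ h2]
      simp only [h2]

theorem pvStepR_eq (d : PySem.Dict (List Int) (PySem.Dict Int Int)) (q : (List Int × Int) × Int) :
    pvStepR d q = d.insert q.1.1 ((d.getD q.1.1 PySem.Dict.empty).insert q.1.2 q.2) := by
  unfold pvStepR
  rcases h : d.get? q.1.1 with _ | inner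
  · rw [PySem.Dict.getD_of_get?_eq_none _ _ h]
  · rw [PySem.Dict.getD_of_get?_eq_some _ _ h]

-- getD of a keyed insert-fold: only the items whose key matches matter, in order.
theorem pvGetD_foldl_insert_key {α κ ν : Type} [BEq κ] [LawfulBEq κ]
    (key : α → κ) (F : ν → α → ν) (l : List α) (d0 : PySem.Dict κ ν) (g : κ) (dflt : ν) :
    (l.foldl (fun d x => d.insert (key x) (F (d.getD (key x) dflt) x)) d0).getD g dflt
      = (l.filter (fun x => key x == g)).foldl F (d0.getD g dflt) := by
  induction l generalizing d0 with
  | nil => rfl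
  | cons x t ih =>
    simp only [List.foldl_cons, List.filter_cons]
    by_cases hk : key x = g
    · subst hk
      simp [ih, PySem.Dict.getD_insert_self]
    · have hb : (key x == g) = false := by simp [hk]
      rw [hb]
      simp only [Bool.false_eq_true, if_false, ih]
      rw [PySem.Dict.getD_insert_of_ne _ _ _ (Ne.symm hk)]

-- first-occurrence dedup commutes with mapping over an already-deduped list
theorem pvOfList_map_ofList {α β : Type} [BEq α] [LawfulBEq α] [BEq β] [LawfulBEq β]
    (f : α → β) (l : List α) :
    PySem.Set.ofList ((PySem.Set.ofList l).map f) = PySem.Set.ofList (l.map f) := by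
  induction l using List.reverseRecOn with
  | nil => rfl
  | append_singleton t x ih =>
    rw [PySem.Set.ofList_append_singleton, List.map_append, List.map_singleton,
        PySem.Set.ofList_append_singleton, ← ih]
    by_cases hx : x ∈ t
    · rw [PySem.Set.add_of_mem (by rw [PySem.Set.mem_ofList]; exact hx)]
      rw [PySem.Set.add_of_mem]
      rw [PySem.Set.mem_ofList]
      exact List.mem_map_of_mem (l := PySem.Set.ofList t) (f := f)
        (by rw [PySem.Set.mem_ofList]; exact hx)
    · rw [PySem.Set.add_of_not_mem (by rw [PySem.Set.mem_ofList]; exact hx)]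
      rw [List.map_append, List.map_singleton, PySem.Set.ofList_append_singleton]

-- first-occurrence dedup commutes with filter
theorem pvFilter_ofList {α : Type} [BEq α] [LawfulBEq α] (p : α → Bool) (l : List α) :
    (PySem.Set.ofList l).filter p = PySem.Set.ofList (l.filter p) := by
  induction l using List.reverseRecOn with
  | nil => rfl
  | append_singleton t x ih =>
    have hfx : List.filter p [x] = if p x then [x] else [] := by
      by_cases hp : p x <;> simp [hp]
    rw [PySem.Set.ofList_append_singleton, List.filter_append, hfx]
    by_cases hx : x ∈ t
    · rw [PySem.Set.add_of_mem (by simp [PySem.Set.mem_ofList, hx])]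
      by_cases hp : p x
      · rw [if_pos hp, PySem.Set.ofList_append_singleton,
            PySem.Set.add_of_mem (by simp [PySem.Set.mem_ofList, List.mem_filter, hx, hp])]
        exact ih
      · rw [if_neg hp, List.append_nil]
        exact ih
    · rw [PySem.Set.add_of_not_mem (by simp [PySem.Set.mem_ofList, hx]), List.filter_append, hfx,
          ih]
      by_cases hp : p x
      · rw [if_pos hp, PySem.Set.ofList_append_singleton,
            PySem.Set.add_of_not_mem (by simp [PySem.Set.mem_ofList, List.mem_filter, hx])]
      · rw [if_neg hp, List.append_nil, List.append_nil]

-- first-occurrence dedup commutes with a map that is injective on the list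
theorem pvMap_ofList_inj {α β : Type} [BEq α] [LawfulBEq α] [BEq β] [LawfulBEq β]
    (f : α → β) (l : List α) (hinj : ∀ a ∈ l, ∀ b ∈ l, f a = f b → a = b) :
    (PySem.Set.ofList l).map f = PySem.Set.ofList (l.map f) := by
  induction l using List.reverseRecOn with
  | nil => rfl
  | append_singleton t x ih =>
    have hinj' : ∀ a ∈ t, ∀ b ∈ t, f a = f b → a = b := fun a ha b hb =>
      hinj a (List.mem_append_left _ ha) b (List.mem_append_left _ hb)
    rw [PySem.Set.ofList_append_singleton, List.map_append, List.map_singleton,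
        PySem.Set.ofList_append_singleton, ← ih hinj']
    by_cases hx : x ∈ t
    · rw [PySem.Set.add_of_mem (by simp [PySem.Set.mem_ofList, hx])]
      rw [PySem.Set.add_of_mem]
      exact List.mem_map_of_mem (by simp [PySem.Set.mem_ofList, hx])
    · rw [PySem.Set.add_of_not_mem (by simp [PySem.Set.mem_ofList, hx])]
      rw [List.map_append, List.map_singleton, PySem.Set.add_of_not_mem]
      intro hmem
      rcases List.mem_map.mp hmem with ⟨a, ha, hfa⟩
      rw [PySem.Set.mem_ofList] at ha
      exact hx (hinj a (List.mem_append_left _ ha) x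
        (List.mem_append_right _ (List.mem_singleton_self x)) hfa ▸ ha)

-- the inner dict for one window g: A's per-group tally = B's regrouped flat entries for g
theorem pvInner (ps : List (List Int × Int)) (g : List Int) :
    ((ps.filter (fun p => p.1 == g)).foldl pvFN PySem.Dict.empty)
      = (((PySem.Dict.counter ps).items.filter (fun q => q.1.1 == g)).foldl pvFR
          PySem.Dict.empty) := by
  have hmem : ∀ p ∈ ps.filter (fun p => p.1 == g), p.1 = g := by
    intro p hp
    simpa using (List.mem_filter.mp hp).2
  have hA : (ps.filter (fun p => p.1 == g)).foldl pvFN PySem.Dict.empty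
      = PySem.Dict.counter ((ps.filter (fun p => p.1 == g)).map Prod.snd) := by
    rw [← PySem.Dict.foldl_insert_getD_add_one_eq_counter, List.foldl_map]
    rfl
  rw [hA, PySem.Dict.items_counter, List.filter_map]
  have hcomp : ((fun q : (List Int × Int) × Int => q.1.1 == g)
      ∘ (fun k : List Int × Int => (k, (ps.count k : Int)))) = fun k => k.1 == g := rfl
  rw [hcomp, pvFilter_ofList, List.foldl_map]
  have hq : ∀ k ∈ PySem.Set.ofList (ps.filter (fun p => p.1 == g)), k.1 = g := by
    intro k hk
    rw [PySem.Set.mem_ofList] at hk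
    exact hmem k hk
  apply PySem.Dict.ext
  simp only [pvFR]
  rw [PySem.Dict.items_counter]
  rw [PySem.Dict.items_foldl_insert_fresh _ _ _ _ (fun a _ => PySem.Dict.contains_empty _)
      (by
        apply List.Nodup.map_on
        · intro x hx y hy hxy
          exact Prod.ext (by rw [hq x hx, hq y hy]) hxy
        · exact PySem.Set.nodup_ofList _)]
  rw [← pvMap_ofList_inj Prod.snd _ (by
        intro a ha b hb hab
        exact Prod.ext (by rw [(hmem a ha), (hmem b hb)]) hab)]
  simp only [PySem.Dict.empty, List.map_map]
  apply List.map_congr_left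
  intro k hk
  simp only [Function.comp]
  congr 1
  have hk1 : k.1 = g := hq k hk
  rw [List.count_eq_countP, List.countP_map, List.count_eq_countP, List.countP_filter]
  norm_cast
  apply List.countP_congr
  intro p _
  constructor
  · intro h
    have h2 : p.2 = k.2 ∧ p.1 = g := by simpa using h
    simp [Prod.ext_iff, h2.1, h2.2, hk1]
  · intro h
    have h2 : p = k := by simpa using h
    simp [h2, hk1]

-- MAIN: A's one-pass nested fold equals B's regrouping fold over the flat counter's items.
theorem pvMain (ps : List (List Int × Int)) :
    ps.foldl pvStepN PySem.Dict.empty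
      = (PySem.Dict.counter ps).items.foldl pvStepR PySem.Dict.empty := by
  have hNfun : pvStepN
      = fun d p => d.insert p.1 (pvFN (d.getD p.1 PySem.Dict.empty) p) := by
    funext d p
    rw [pvStepN_eq]
    rfl
  have hRfun : pvStepR
      = fun d q => d.insert q.1.1 (pvFR (d.getD q.1.1 PySem.Dict.empty) q) := by
    funext d q
    rw [pvStepR_eq]
    rfl
  rw [hNfun, hRfun]
  have hkA : (ps.foldl (fun d p => d.insert p.1 (pvFN (d.getD p.1 PySem.Dict.empty) p))
      PySem.Dict.empty).keys = PySem.Set.ofList (ps.map Prod.fst) := by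
    rw [PySem.Dict.keys_foldl_insert_key ps Prod.fst
        (fun d p => pvFN (d.getD p.1 PySem.Dict.empty) p) PySem.Dict.empty]
    exact PySem.Set.update_empty _
  have hkB : ((PySem.Dict.counter ps).items.foldl
      (fun d q => d.insert q.1.1 (pvFR (d.getD q.1.1 PySem.Dict.empty) q))
      PySem.Dict.empty).keys = PySem.Set.ofList (ps.map Prod.fst) := by
    rw [PySem.Dict.keys_foldl_insert_key (PySem.Dict.counter ps).items (fun q => q.1.1)
        (fun d q => pvFR (d.getD q.1.1 PySem.Dict.empty) q) PySem.Dict.empty]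
    simp only [PySem.Dict.items_counter, List.map_map]
    have hfst : ((fun q : (List Int × Int) × Int => q.1.1) ∘ fun k : List Int × Int =>
        (k, (ps.count k : Int))) = Prod.fst := rfl
    rw [hfst]
    exact (PySem.Set.update_empty _).trans (pvOfList_map_ofList Prod.fst ps)
  apply PySem.Dict.ext
  rw [PySem.Dict.items_eq_map_keys _ (by rw [hkA]; exact PySem.Set.nodup_ofList _)
        PySem.Dict.empty,
      PySem.Dict.items_eq_map_keys _ (by rw [hkB]; exact PySem.Set.nodup_ofList _)
        PySem.Dict.empty,
      hkA, hkB]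
  apply List.map_congr_left
  intro g _
  congr 1
  rw [pvGetD_foldl_insert_key Prod.fst pvFN ps PySem.Dict.empty g PySem.Dict.empty,
      pvGetD_foldl_insert_key (fun q => q.1.1) pvFR (PySem.Dict.counter ps).items
        PySem.Dict.empty g PySem.Dict.empty]
  have hemp : (PySem.Dict.empty : PySem.Dict (List Int) (PySem.Dict Int Int)).getD g
      PySem.Dict.empty = PySem.Dict.empty := PySem.Dict.getD_empty _ _
  rw [hemp]
  exact pvInner ps g

-- the (window, follower) pair read at index i
def pvKey (content : List Int) (group_size : Int) (i : Int) : List Int × Int :=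
  (PySem.List.slice content (some i) (some (i + group_size)),
   PySem.List.pyGetD content (i + group_size) 0)

theorem pvPortA (content : List Int) (group_size : Int) :
    count_group_following_elements content group_size
      = ((((PySem.List.pyRange 0 (PySem.List.len content - group_size) 1).map
            (pvKey content group_size)).foldl pvStepN PySem.Dict.empty).items.map
          (fun p => (p.1, p.2.items))) := by
  unfold count_group_following_elements
  rw [List.foldl_map]
  rfl

theorem pvPortB (content : List Int) (group_size : Int) :
    count_group_following_elements_alt content group_size
      = (((PySem.Dict.counter ((PySem.List.pyRange 0 (PySem.List.len content - group_size) 1).map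
            (pvKey content group_size))).items.foldl pvStepR PySem.Dict.empty).items.map
          (fun p => (p.1, p.2.items))) := by
  unfold count_group_following_elements_alt
  rw [← PySem.Dict.foldl_insert_getD_add_one_eq_counter, List.foldl_map]
  rfl

-- ===== VERDICT (by name: the statement is the Claim_ definition above) =====
theorem count_group_following_elements_spec : Claim_equal_count_group_following_elements := by
  intro content group_size _ _
  unfold Spec_count_group_following_elements
  rw [pvPortA, pvPortB, pvMain]
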